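-- pv_equiv track=rewrite | github.com/pablost1/Learning | Python/Programação_1/Challenges/Monitoria - Lista 4/eae.py | MaioresQueLimite
-- ===== SOURCE A (Python) =====
-- def MaioresQueLimite(limite,lista):
--     if len(lista) == 0:
--         return []
--     else:
--         lissta = []
--         if lista[0] > limite:
--             lissta.append(lista.pop(0))
--         elif lista[0] <= limite:
--             lista.pop(0)
--         return lissta + MaioresQueLimite(limite,lista)
-- ===== SOURCE B (Python) =====
-- def MaioresQueLimite(limite, lista):
--     # Iterative: consume lista from the front (same mutation: lista ends empty),
--     # accumulating the elements greater than limite in order.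
--     result = []
--     while lista:
--         x = lista.pop(0)
--         if x > limite:
--             result.append(x)
--     return result
-- ===== Notes on version B (the rewrite author's own statement) =====
-- stated objective: simpler
-- what changed: Replaces the recursive one-element-per-call decomposition (which rebuilds the result by list concatenation at every level and hits RecursionError on long lists) with a single iterative while-pop loop and an accumulator; lista is still emptied in place.
import Mathlib
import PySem

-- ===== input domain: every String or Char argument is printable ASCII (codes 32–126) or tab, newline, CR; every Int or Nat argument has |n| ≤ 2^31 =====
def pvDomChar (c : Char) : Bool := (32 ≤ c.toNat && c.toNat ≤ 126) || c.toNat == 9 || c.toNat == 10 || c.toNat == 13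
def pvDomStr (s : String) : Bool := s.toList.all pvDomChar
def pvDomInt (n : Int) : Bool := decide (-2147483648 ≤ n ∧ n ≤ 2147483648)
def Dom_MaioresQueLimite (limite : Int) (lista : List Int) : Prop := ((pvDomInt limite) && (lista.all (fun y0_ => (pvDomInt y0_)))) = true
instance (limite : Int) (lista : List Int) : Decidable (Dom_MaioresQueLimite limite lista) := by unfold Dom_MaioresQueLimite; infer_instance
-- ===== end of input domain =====

-- B replaces A's per-element recursion by a single iterative while-pop loop with an
-- accumulator (simpler); return values agree and both empty lista in place in Python.

-- ===== PORT A =====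
-- A: if the list is empty return []; else put the head in lissta iff head > limite,
-- pop it either way, and prepend lissta to the recursive call on the rest.
def MaioresQueLimite (limite : Int) (lista : List Int) : List Int :=
  match lista with
  | [] => []
  | x :: rest =>
      (if x > limite then [x] else []) ++ MaioresQueLimite limite rest

-- ===== PORT B =====
-- B's while-pop loop: state is (result, remaining lista); each step pops the front
-- and appends it to result when it exceeds limite.
def MaioresQueLimiteLoop (limite : Int) (result : List Int) (lista : List Int) : List Int :=
  match lista with
  | [] => result
  | x :: rest =>
      MaioresQueLimiteLoop limite (if x > limite then result ++ [x] else result) rest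

def MaioresQueLimite_alt (limite : Int) (lista : List Int) : List Int :=
  MaioresQueLimiteLoop limite [] lista

-- ===== PRECONDITION & SPEC =====
def Spec_MaioresQueLimite (limite : Int) (lista : List Int) (out : List Int) : Prop := out = MaioresQueLimite_alt limite lista
instance (limite : Int) (lista : List Int) (out : List Int) : Decidable (Spec_MaioresQueLimite limite lista out) := by unfold Spec_MaioresQueLimite; infer_instance

-- ===== CLAIM (what is proved, stated in full; the proofs are below) =====
def Claim_equal_MaioresQueLimite : Prop := ∀ (limite : Int) (lista : List Int), Dom_MaioresQueLimite limite lista → Spec_MaioresQueLimite limite lista (MaioresQueLimite limite lista)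

-- ===== LEMMAS AND PROOFS =====
theorem loop_acc (limite : Int) (lista acc : List Int) :
    MaioresQueLimiteLoop limite acc lista = acc ++ MaioresQueLimite limite lista := by
  induction lista generalizing acc with
  | nil => simp [MaioresQueLimiteLoop, MaioresQueLimite]
  | cons x rest ih =>
      simp only [MaioresQueLimiteLoop, MaioresQueLimite]
      split_ifs with h <;> simp [ih]

-- ===== VERDICT (by name: the statement is the Claim_ definition above) =====
theorem MaioresQueLimite_spec : Claim_equal_MaioresQueLimite := by
  intro limite lista _
  unfold Spec_MaioresQueLimite MaioresQueLimite_alt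
  simp [loop_acc]
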